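-- pv_equiv track=rewrite | github.com/ere8o/python_snippets | blanagram.py | blanagram
-- ===== SOURCE A (Python) =====
-- def blanagram(word1, word2):
--     letter_count1 = {}
--     letter_count2 = {}
--
--     letters = {}
--
--     for letter in word1:
--         letter_count1[letter] = letter_count1.get(letter, 0) + 1
--         letters[letter] = letters.get(letter, letter)
--
--     for letter in word2:
--         letter_count2[letter] = letter_count2.get(letter, 0) + 1
--         letters[letter] = letters.get(letter, letter)
--
--     letter_difference = 0
--     for letter in letters.values():
--         l = letter_count1.get(letter, 0)
--         r = letter_count2.get(letter, 0)
--         letter_difference += abs(l - r)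
--
--     return letter_difference == 2
-- ===== SOURCE B (Python) =====
-- def blanagram(word1, word2):
--     rest = list(word2)
--     unmatched = 0
--     for ch in word1:
--         try:
--             rest.remove(ch)
--         except ValueError:
--             unmatched += 1
--     return unmatched + len(rest) == 2
-- ===== Notes on version B (the rewrite author's own statement) =====
-- stated objective: alternative
-- what changed: Replaces A's three dicts and the abs-difference loop over a union-of-letters dict by dict-free greedy multiset matching: B copies word2's letters into a list, removes one occurrence per letter of word1 (counting failures), and checks failures + leftovers == 2.
import Mathlib
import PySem

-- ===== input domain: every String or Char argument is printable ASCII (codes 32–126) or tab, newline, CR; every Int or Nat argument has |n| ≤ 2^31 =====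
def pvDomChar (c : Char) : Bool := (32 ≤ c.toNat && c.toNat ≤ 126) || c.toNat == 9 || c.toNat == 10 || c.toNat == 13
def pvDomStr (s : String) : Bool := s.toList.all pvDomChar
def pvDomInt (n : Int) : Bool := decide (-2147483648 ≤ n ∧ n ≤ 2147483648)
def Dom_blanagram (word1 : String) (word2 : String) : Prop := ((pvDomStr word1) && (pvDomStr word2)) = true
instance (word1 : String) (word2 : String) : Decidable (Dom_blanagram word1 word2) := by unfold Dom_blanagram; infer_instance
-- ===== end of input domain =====

-- B replaces A's dicts and abs-difference union loop by dict-free greedy multiset matching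
-- (remove each letter of word1 from a copy of word2's letters, count failures + leftovers);
-- alternative decomposition, not faster.

-- ===== PORT A =====
def blanagram (word1 : String) (word2 : String) : Bool :=
  -- loop 1: builds letter_count1 and letters together
  let s1 := word1.toList.foldl
    (fun (p : PySem.Dict Char Int × PySem.Dict Char Char) letter =>
      (p.1.insert letter (p.1.getD letter 0 + 1), p.2.insert letter (p.2.getD letter letter)))
    (PySem.Dict.empty, PySem.Dict.empty)
  -- loop 2: builds letter_count2 and extends letters
  let s2 := word2.toList.foldl
    (fun (p : PySem.Dict Char Int × PySem.Dict Char Char) letter =>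
      (p.1.insert letter (p.1.getD letter 0 + 1), p.2.insert letter (p.2.getD letter letter)))
    (PySem.Dict.empty, s1.2)
  let letterDifference := s2.2.values.foldl
    (fun acc letter => acc + |s1.1.getD letter 0 - s2.1.getD letter 0|) (0 : Int)
  letterDifference == 2

-- ===== PORT B =====
def blanagram_alt (word1 : String) (word2 : String) : Bool :=
  -- rest = list(word2); for ch in word1: try rest.remove(ch) except ValueError: unmatched += 1
  let s := word1.toList.foldl
    (fun (p : List Char × Int) ch =>
      match PySem.List.remove? p.1 ch with
      | some r => (r, p.2)
      | none => (p.1, p.2 + 1))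
    (word2.toList, (0 : Int))
  (s.2 + (s.1.length : Int)) == 2

-- ===== PRECONDITION & SPEC =====
def Spec_blanagram (word1 : String) (word2 : String) (out : Bool) : Prop := out = blanagram_alt word1 word2
instance (word1 : String) (word2 : String) (out : Bool) : Decidable (Spec_blanagram word1 word2 out) := by unfold Spec_blanagram; infer_instance

-- ===== CLAIM (what is proved, stated in full; the proofs are below) =====
def Claim_equal_blanagram : Prop := ∀ (word1 : String) (word2 : String), Dom_blanagram word1 word2 → Spec_blanagram word1 word2 (blanagram word1 word2)

-- ===== LEMMAS AND PROOFS =====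

-- every value stored by A's 'letters' fold equals its key
theorem pvLetters_get? (l : List Char) (d : PySem.Dict Char Char)
    (h : ∀ k v, d.get? k = some v → v = k) :
    ∀ k v, (l.foldl (fun d x => d.insert x (d.getD x x)) d).get? k = some v → v = k := by
  induction l generalizing d with
  | nil => exact h
  | cons x t ih =>
    simp only [List.foldl_cons]
    apply ih
    intro k v hk
    rw [PySem.Dict.get?_insert] at hk
    by_cases hkx : k = x
    · simp only [if_pos hkx] at hk
      subst hkx
      cases hgx : d.get? k with
      | none => rw [PySem.Dict.getD_eq_get?_getD, hgx] at hk; simpa using hk.symm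
      | some w =>
        rw [PySem.Dict.getD_eq_get?_getD, hgx] at hk
        have hw := h k w hgx
        simp only [Option.getD_some, Option.some.injEq] at hk
        exact hk ▸ hw
    · rw [if_neg hkx] at hk
      exact h k v hk

-- the 'letters' dict's value list is its key list
theorem pvLetters_values (w1 w2 : List Char) :
    (w2.foldl (fun d x => d.insert x (d.getD x x))
      (w1.foldl (fun d x => d.insert x (d.getD x x)) (PySem.Dict.empty : PySem.Dict Char Char))).values
    = PySem.Set.update (PySem.Set.ofList w1) w2 := by
  set L := w2.foldl (fun d x => d.insert x (d.getD x x))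
      (w1.foldl (fun d x => d.insert x (d.getD x x)) (PySem.Dict.empty : PySem.Dict Char Char)) with hL
  have hnd : L.keys.Nodup := by
    rw [hL]
    apply PySem.Dict.nodup_keys_foldl_insert
    apply PySem.Dict.nodup_keys_foldl_insert
    exact PySem.Dict.nodup_keys_empty
  have hkeys : L.keys = PySem.Set.update (PySem.Set.ofList w1) w2 := by
    rw [hL, PySem.Dict.keys_foldl_insert, PySem.Dict.keys_foldl_insert,
        PySem.Dict.keys_empty, PySem.Set.update_nil_left]
  have hinv : ∀ k v, L.get? k = some v → v = k := by
    intro k v hkv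
    refine pvLetters_get? w2 _ ?_ k v hkv
    refine pvLetters_get? w1 _ ?_
    intro k v h
    rw [PySem.Dict.get?_empty] at h
    cases h
  have hv : L.values = L.keys.map (fun k => L.getD k 'a') :=
    PySem.Dict.values_eq_map_keys L hnd 'a'
  have hid : L.keys.map (fun k => L.getD k 'a') = L.keys := by
    conv_rhs => rw [← List.map_id L.keys]
    apply List.map_congr_left
    intro k hk
    cases hg : L.get? k with
    | none =>
      have hc : L.contains k = true := (PySem.Dict.contains_iff_mem_keys L k).mpr hk
      rw [PySem.Dict.contains_eq_isSome_get?, hg] at hc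
      simp at hc
    | some v =>
      rw [PySem.Dict.getD_eq_get?_getD, hg]
      simp only [Option.getD_some, id_eq]
      exact hinv k v hg
  rw [hv, hid, hkeys]

-- A's letter_difference is the sum of |count1 - count2| over the union of letters
theorem pvA_val (word1 word2 : String) :
    blanagram word1 word2 =
      ((((PySem.Set.update (PySem.Set.ofList word1.toList) word2.toList).map
          (fun x => |(word1.toList.count x : Int) - (word2.toList.count x : Int)|)).sum) == 2) := by
  simp only [blanagram]
  rw [PySem.List.foldl_prod_mk
        (f := fun (d : PySem.Dict Char Int) (letter : Char) => d.insert letter (d.getD letter 0 + 1))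
        (g := fun (d : PySem.Dict Char Char) (letter : Char) => d.insert letter (d.getD letter letter)),
      PySem.List.foldl_prod_mk
        (f := fun (d : PySem.Dict Char Int) (letter : Char) => d.insert letter (d.getD letter 0 + 1))
        (g := fun (d : PySem.Dict Char Char) (letter : Char) => d.insert letter (d.getD letter letter))]
  simp only [PySem.Dict.foldl_insert_getD_add_one_eq_counter]
  rw [pvLetters_values word1.toList word2.toList,
      PySem.List.foldl_add (g := fun letter => |(PySem.Dict.counter word1.toList).getD letter 0
        - (PySem.Dict.counter word2.toList).getD letter 0|)]
  simp only [PySem.Dict.getD_counter, zero_add]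

-- B's fold state: the failure counter grows by card (l - rest) and the remaining
-- letters are the multiset difference rest - l
theorem pvFoldB (l : List Char) (rest : List Char) (u : Int) :
    (l.foldl
      (fun (p : List Char × Int) ch =>
        match PySem.List.remove? p.1 ch with
        | some r => (r, p.2)
        | none => (p.1, p.2 + 1)) (rest, u)).2
      = u + ((((l : Multiset Char) - (rest : Multiset Char)).card : Nat) : Int)
    ∧ (((l.foldl
      (fun (p : List Char × Int) ch =>
        match PySem.List.remove? p.1 ch with
        | some r => (r, p.2)
        | none => (p.1, p.2 + 1)) (rest, u)).1 : List Char) : Multiset Char)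
      = (rest : Multiset Char) - (l : Multiset Char) := by
  induction l generalizing rest u with
  | nil => simp
  | cons ch t ih =>
    simp only [List.foldl_cons]
    by_cases hm : ch ∈ rest
    · rw [show (match PySem.List.remove? rest ch with
          | some r => (r, u)
          | none => (rest, u + 1)) = ((rest.erase ch : List Char), u) from by
        rw [PySem.List.remove?_eq_some_erase rest ch hm]]
      obtain ⟨iha, ihb⟩ := ih (rest.erase ch) u
      have hc : 0 < rest.count ch := List.count_pos_iff.mpr hm
      have h1 : ((ch :: t : List Char) : Multiset Char) - (rest : Multiset Char)
          = (t : Multiset Char) - ((rest.erase ch : List Char) : Multiset Char) := by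
        ext x
        simp only [Multiset.count_sub, ← Multiset.cons_coe, Multiset.count_cons,
          Multiset.coe_count]
        by_cases hx : x = ch
        · subst hx; rw [List.count_erase_self]; simp; omega
        · rw [List.count_erase_of_ne hx]; simp [hx]
      have h2 : ((rest.erase ch : List Char) : Multiset Char) - (t : Multiset Char)
          = (rest : Multiset Char) - ((ch :: t : List Char) : Multiset Char) := by
        rw [← Multiset.cons_coe, Multiset.sub_cons, ← Multiset.coe_erase]
      exact ⟨by rw [iha, ← h1], by rw [ihb, h2]⟩
    · rw [show (match PySem.List.remove? rest ch with
          | some r => (r, u)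
          | none => (rest, u + 1)) = (rest, u + 1) from by
        rw [(PySem.List.remove?_eq_none_iff rest ch).mpr hm]]
      obtain ⟨iha, ihb⟩ := ih rest (u + 1)
      have hc : (rest : Multiset Char).count ch = 0 := by
        rw [Multiset.count_eq_zero]; simpa using hm
      have h1 : ((ch :: t : List Char) : Multiset Char) - (rest : Multiset Char)
          = ch ::ₘ ((t : Multiset Char) - (rest : Multiset Char)) := by
        ext x
        simp only [Multiset.count_sub, ← Multiset.cons_coe, Multiset.count_cons]
        by_cases hx : x = ch <;> simp [hx, hc]
      have h2 : (rest : Multiset Char) - (t : Multiset Char)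
          = (rest : Multiset Char) - ((ch :: t : List Char) : Multiset Char) := by
        ext x
        simp only [Multiset.count_sub, ← Multiset.cons_coe, Multiset.count_cons]
        by_cases hx : x = ch <;> simp [hx, hc]
      refine ⟨?_, by rw [ihb, h2]⟩
      rw [iha, h1]
      simp only [Multiset.card_cons]
      push_cast
      ring

-- sum of |Δ| over the union set equals card (w1 - w2) + card (w2 - w1) (multiset differences)
theorem pvAbsSum (w1 w2 : List Char) :
    (((PySem.Set.update (PySem.Set.ofList w1) w2).map
        (fun x => |(w1.count x : Int) - (w2.count x : Int)|)).sum)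
    = ((((w1 : Multiset Char) - (w2 : Multiset Char)).card : Nat) : Int) + ((((w2 : Multiset Char) - (w1 : Multiset Char)).card : Nat) : Int) := by
  have hnd := PySem.Set.nodup_update (PySem.Set.ofList w1) w2 (PySem.Set.nodup_ofList w1)
  have hsum : ∀ (f : Char → Int),
      ((PySem.Set.update (PySem.Set.ofList w1) w2).map f).sum
      = (PySem.Set.update (PySem.Set.ofList w1) w2).toFinset.sum f :=
    fun f => (List.sum_toFinset f hnd).symm
  have hU : ∀ x : Char, x ∈ (PySem.Set.update (PySem.Set.ofList w1) w2).toFinset ↔ x ∈ w1 ∨ x ∈ w2 := by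
    intro x; simp [PySem.Set.mem_update, PySem.Set.mem_ofList]
  -- card (a - b) = sum of its counts over the union finset, provided a's letters are in the union
  have hcard2 : ∀ (a b : List Char), (∀ x ∈ a, x ∈ w1 ∨ x ∈ w2) →
      ((((a : Multiset Char) - (b : Multiset Char)).card : Nat))
      = ∑ x ∈ (PySem.Set.update (PySem.Set.ofList w1) w2).toFinset, (a.count x - b.count x) := by
    intro a b hmem
    rw [← Multiset.toFinset_sum_count_eq ((a : Multiset Char) - (b : Multiset Char))]
    have hs : ((a : Multiset Char) - (b : Multiset Char)).toFinset
        ⊆ (PySem.Set.update (PySem.Set.ofList w1) w2).toFinset := by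
      intro x hx
      rw [hU]
      have hx1 : x ∈ ((a : Multiset Char) - (b : Multiset Char)) := by simpa using hx
      have hx2 : x ∈ (a : Multiset Char) := Multiset.mem_of_le (Multiset.sub_le_self _ _) hx1
      exact hmem x (by simpa using hx2)
    have hz : ∀ x ∈ (PySem.Set.update (PySem.Set.ofList w1) w2).toFinset,
        x ∉ ((a : Multiset Char) - (b : Multiset Char)).toFinset →
        Multiset.count x ((a : Multiset Char) - (b : Multiset Char)) = 0 := by
      intro x _ hx
      rw [Multiset.count_eq_zero]
      simpa using hx
    rw [Finset.sum_subset hs hz]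
    exact Finset.sum_congr rfl (fun x _ => by simp [Multiset.coe_count, List.count_diff])
  rw [hsum]
  rw [hcard2 w1 w2 (fun x hx => Or.inl hx), hcard2 w2 w1 (fun x hx => Or.inr hx)]
  push_cast
  rw [← Finset.sum_add_distrib]
  apply Finset.sum_congr rfl
  intro x _
  have h1 : (((w1.count x - w2.count x : Nat) : Int)) = max ((w1.count x : Int) - w2.count x) 0 := by
    omega
  have h2 : (((w2.count x - w1.count x : Nat) : Int)) = max ((w2.count x : Int) - w1.count x) 0 := by
    omega
  rw [h1, h2]
  rcases le_total ((w1.count x : Int)) ((w2.count x : Int)) with h | h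
  · rw [abs_of_nonpos (by omega)]; omega
  · rw [abs_of_nonneg (by omega)]; omega

theorem pvMain (word1 word2 : String) : blanagram word1 word2 = blanagram_alt word1 word2 := by
  rw [pvA_val, pvAbsSum]
  simp only [blanagram_alt]
  obtain ⟨ha, hb⟩ := pvFoldB word1.toList word2.toList 0
  have hlen : ((word1.toList.foldl
      (fun (p : List Char × Int) ch =>
        match PySem.List.remove? p.1 ch with
        | some r => (r, p.2)
        | none => (p.1, p.2 + 1)) (word2.toList, (0 : Int))).1).length
      = ((word2.toList : Multiset Char) - (word1.toList : Multiset Char)).card := by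
    have := congrArg Multiset.card hb
    simpa using this
  have : ((((word1.toList : Multiset Char) - (word2.toList : Multiset Char)).card : Nat) : Int)
      + ((((word2.toList : Multiset Char) - (word1.toList : Multiset Char)).card : Nat) : Int)
      = (word1.toList.foldl
          (fun (p : List Char × Int) ch =>
            match PySem.List.remove? p.1 ch with
            | some r => (r, p.2)
            | none => (p.1, p.2 + 1)) (word2.toList, (0 : Int))).2
        + (((word1.toList.foldl
          (fun (p : List Char × Int) ch =>
            match PySem.List.remove? p.1 ch with
            | some r => (r, p.2)
            | none => (p.1, p.2 + 1)) (word2.toList, (0 : Int))).1).length : Int) := by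
    rw [ha, hlen]; ring
  rw [this]

-- ===== VERDICT (by name: the statement is the Claim_ definition above) =====
theorem blanagram_spec : Claim_equal_blanagram := by
  intro word1 word2 _
  unfold Spec_blanagram
  exact pvMain word1 word2
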